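-- pv_equiv track=rewrite | github.com/daniel-reich/ubiquitous-fiesta | MvtxpxtFDrzEtA9k5_24.py | palindrome_descendant
-- ===== SOURCE A (Python) =====
-- def palindrome_descendant(num):
--     if  str(num)==str(num)[::-1]:
--         return True
--     while num>9:
--         num=str(num)
--         t=''
--         for i in range(0,len(num),2):
--             t+=str(int(num[i])+int(num[i+1]))
--         if len(t)%2==1:
--             return False
--         if  t==t[::-1]:
--             return True
--         num=int(t)
--     return False
-- ===== SOURCE B (Python) =====
-- def _pairs(s):
--     it = iter(s)
--     return [(a, next(it)) for a in it]
--
--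
-- def _descend(num):
--     if num <= 9:
--         return False
--     t = ''.join(str(int(a) + int(b)) for a, b in _pairs(str(num)))
--     if len(t) % 2 == 1:
--         return False
--     if t == t[::-1]:
--         return True
--     return _descend(int(t))
--
--
-- def palindrome_descendant(num):
--     s = str(num)
--     if s == s[::-1]:
--         return True
--     return _descend(num)
-- ===== Notes on version B (the rewrite author's own statement) =====
-- stated objective: alternative
-- what changed: Replaces A's while loop with index arithmetic over range(0,len,2) by a recursive descent that chunks the digit string into pairs with an iterator and joins the per-pair sum strings in one comprehension.
import Mathlib
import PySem

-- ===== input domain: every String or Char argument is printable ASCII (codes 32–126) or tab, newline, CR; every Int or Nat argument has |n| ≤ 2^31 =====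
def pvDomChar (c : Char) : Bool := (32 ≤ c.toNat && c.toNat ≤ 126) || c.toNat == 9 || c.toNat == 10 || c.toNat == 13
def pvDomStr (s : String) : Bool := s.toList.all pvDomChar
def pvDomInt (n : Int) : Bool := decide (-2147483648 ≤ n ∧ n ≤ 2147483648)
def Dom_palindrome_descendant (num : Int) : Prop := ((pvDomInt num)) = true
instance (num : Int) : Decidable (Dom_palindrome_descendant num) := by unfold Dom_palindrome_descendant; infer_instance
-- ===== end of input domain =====

-- B re-implements the pair-sum collapse chain as a recursive descent with iterator pairing
-- (chunking the digit string two at a time) instead of A's while loop with index arithmetic;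
-- objective: alternative decomposition, same cost.

-- ===== PORT A =====

-- int(num[i]) of A: IndexError (pyGet? = none) and the unreachable non-digit parse are
-- modelled by the default 0; Pre_ excludes the one place Python reaches the IndexError.
def pdCharIntA (cs : List Char) (i : Int) : Int :=
  ((PySem.List.pyGet? cs i).bind (fun c => PySem.Int.ofChars? [c])).getD 0

-- the for-loop 'for i in range(0,len(num),2): t += str(int(num[i])+int(num[i+1]))'
def pdCollapseA (cs : List Char) : List Char :=
  (PySem.List.pyRange 0 (Int.ofNat cs.length) 2).foldl
    (fun t i => t ++ PySem.Int.toChars (pdCharIntA cs i + pdCharIntA cs (i + 1))) []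

-- the while loop; fuel: the chain value strictly decreases, so num.toNat+1 iterations suffice
def pdLoopA : Nat → Int → Bool
  | 0, _ => false
  | fuel + 1, num =>
    if 9 < num then
      let s := PySem.Int.toChars num
      let t := pdCollapseA s
      if PySem.Int.mod (Int.ofNat t.length) 2 == 1 then false
      else if t == (PySem.List.slice? t none none (-1)).getD [] then true
      else pdLoopA fuel ((PySem.Int.ofChars? t).getD 0)
    else false

def palindrome_descendant (num : Int) : Bool :=
  if PySem.Int.toChars num == (PySem.List.slice? (PySem.Int.toChars num) none none (-1)).getD []
  then true
  else pdLoopA (num.toNat + 1) num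

-- ===== PORT B =====

def pdChrVal (c : Char) : Int := (PySem.Int.ofChars? [c]).getD 0

-- _pairs: chunk the string two at a time; on a trailing lone character Python's next(it)
-- raises (outside Pre_); the non-digit filler ' ' (int value 0) keeps the port total.
def pdPairsB : List Char → List (Char × Char)
  | a :: b :: rest => (a, b) :: pdPairsB rest
  | [a] => [(a, ' ')]
  | [] => []

-- ''.join(str(int(a)+int(b)) for a,b in _pairs(s))
def pdCollapseB (cs : List Char) : List Char :=
  ((pdPairsB cs).map (fun p => PySem.Int.toChars (pdChrVal p.1 + pdChrVal p.2))).flatten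

-- _descend; same fuel bound as A's loop (one unit per recursive call)
def pdDescendB : Nat → Int → Bool
  | 0, _ => false
  | fuel + 1, num =>
    if num ≤ 9 then false
    else
      let t := pdCollapseB (PySem.Int.toChars num)
      if PySem.Int.mod (Int.ofNat t.length) 2 == 1 then false
      else if t == (PySem.List.slice? t none none (-1)).getD [] then true
      else pdDescendB fuel ((PySem.Int.ofChars? t).getD 0)

def palindrome_descendant_alt (num : Int) : Bool :=
  let s := PySem.Int.toChars num
  if s == (PySem.List.slice? s none none (-1)).getD [] then true
  else pdDescendB (num.toNat + 1) num

-- ===== PRECONDITION & SPEC =====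
-- Pre_ excludes exactly the inputs on which Python A raises IndexError: num > 9 whose decimal
-- string is a non-palindrome of odd length (num[i+1] runs past the end on the first collapse).
-- (The ports are total and agree even at the modelled raise points, so the equality proof
-- does not need the hypothesis; Pre_ marks where the Pythons actually return.)
def Pre_palindrome_descendant (num : Int) : Prop :=
  ¬ (9 < num ∧ PySem.Int.toChars num ≠ (PySem.Int.toChars num).reverse ∧
      (PySem.Int.toChars num).length % 2 = 1)
instance (num : Int) : Decidable (Pre_palindrome_descendant num) := by
  unfold Pre_palindrome_descendant; infer_instance

def pvWitness_palindrome_descendant : Int := 12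

def Spec_palindrome_descendant (num : Int) (out : Bool) : Prop := out = palindrome_descendant_alt num
instance (num : Int) (out : Bool) : Decidable (Spec_palindrome_descendant num out) := by unfold Spec_palindrome_descendant; infer_instance

-- ===== CLAIM (what is proved, stated in full; the proofs are below) =====
def Claim_equal_palindrome_descendant : Prop := ∀ (num : Int), Dom_palindrome_descendant num → Pre_palindrome_descendant num → Spec_palindrome_descendant num (palindrome_descendant num)

-- ===== LEMMAS AND PROOFS =====

theorem pdCharIntA_natCast (cs : List Char) (m : Nat) :
    pdCharIntA cs (m : Int) = (cs[m]?.bind (fun c => PySem.Int.ofChars? [c])).getD 0 := by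
  simp [pdCharIntA, PySem.List.pyGet?_natCast]

theorem pdCollapseA_flat (cs : List Char) :
    pdCollapseA cs = (List.range ((cs.length + 1) / 2)).flatMap
      (fun k => PySem.Int.toChars (pdCharIntA cs ((2 * k : Nat) : Int) + pdCharIntA cs ((2 * k + 1 : Nat) : Int))) := by
  unfold pdCollapseA
  rw [PySem.List.foldl_append_eq_flatMap, PySem.List.pyRange_of_pos 0 _ (by norm_num)]
  rw [List.flatMap_map]
  have harg : (Int.ofNat cs.length - 0 + 2 - 1) = ((cs.length + 1 : Nat) : Int) := by
    simp [Int.ofNat_eq_natCast]; ring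
  have hM : (if (0:Int) < Int.ofNat cs.length then ((Int.ofNat cs.length - 0 + 2 - 1) / 2).toNat else 0)
      = (cs.length + 1) / 2 := by
    rw [harg]
    split
    · omega
    · rename_i h
      simp only [Int.ofNat_eq_natCast] at h
      omega
  rw [hM]
  simp only [List.nil_append]
  apply List.flatMap_congr
  intro x _
  rw [show (0:Int) + 2*(x:Int) = ((2*x : Nat) : Int) by push_cast; ring,
     show ((2*x:Nat):Int) + 1 = ((2*x + 1 : Nat) : Int) by push_cast; ring]

theorem pdCharIntA_cons2 (a b : Char) (cs : List Char) (m : Nat) :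
    pdCharIntA (a :: b :: cs) ((m + 2 : Nat) : Int) = pdCharIntA cs (m : Int) := by
  rw [pdCharIntA_natCast (a :: b :: cs) (m + 2), pdCharIntA_natCast cs m]
  simp

theorem pdCollapseA_eq_pdCollapseB (cs : List Char) : pdCollapseA cs = pdCollapseB cs := by
  induction cs using pdPairsB.induct with
  | case1 a b rest ih =>
    rw [pdCollapseA_flat]
    have hlen : ((a :: b :: rest).length + 1) / 2 = (rest.length + 1) / 2 + 1 := by
      simp; omega
    rw [hlen, List.range_succ_eq_map, List.flatMap_cons, List.flatMap_map]
    have h0 : PySem.Int.toChars (pdCharIntA (a :: b :: rest) ((2*0 : Nat) : Int)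
        + pdCharIntA (a :: b :: rest) ((2*0+1 : Nat) : Int))
        = PySem.Int.toChars (pdChrVal a + pdChrVal b) := by
      rw [pdCharIntA_natCast (a :: b :: rest) (2*0), pdCharIntA_natCast (a :: b :: rest) (2*0+1)]
      simp [pdChrVal]
    rw [h0]
    have hrest : (List.range ((rest.length + 1) / 2)).flatMap
        (fun k => PySem.Int.toChars (pdCharIntA (a :: b :: rest) ((2 * Nat.succ k : Nat) : Int)
          + pdCharIntA (a :: b :: rest) ((2 * Nat.succ k + 1 : Nat) : Int)))
        = pdCollapseB rest := by
      rw [← ih, pdCollapseA_flat]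
      apply List.flatMap_congr
      intro x _
      rw [show 2 * Nat.succ x = 2*x + 2 by omega, show 2*x + 2 + 1 = (2*x+1) + 2 by omega,
        pdCharIntA_cons2, pdCharIntA_cons2]
    rw [hrest]
    simp [pdCollapseB, pdPairsB]
  | case2 a =>
    rw [pdCollapseA_flat]
    simp only [pdCollapseB, pdPairsB, List.map_cons, List.map_nil, List.flatten,
      List.length_cons, List.length_nil]
    rw [show (0 + 1 + 1) / 2 = 1 by norm_num, List.range_one, List.flatMap_cons,
      List.flatMap_nil, List.append_nil]
    rw [pdCharIntA_natCast [a] (2*0), pdCharIntA_natCast [a] (2*0+1)]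
    simp [pdChrVal, show PySem.Int.ofChars? [' '] = none from by decide]
  | case3 =>
    rw [pdCollapseA_flat]
    simp [pdCollapseB, pdPairsB]

theorem pdLoopA_eq_pdDescendB (fuel : Nat) (num : Int) :
    pdLoopA fuel num = pdDescendB fuel num := by
  induction fuel generalizing num with
  | zero => rfl
  | succ f ih =>
    simp only [pdLoopA, pdDescendB, pdCollapseA_eq_pdCollapseB]
    by_cases h : 9 < num
    · simp only [if_pos h, if_neg (by omega : ¬ num ≤ 9), ih]
    · simp only [if_neg h, if_pos (by omega : num ≤ 9)]

-- ===== VERDICT (by name: the statement is the Claim_ definition above) =====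
theorem palindrome_descendant_spec : Claim_equal_palindrome_descendant := by
  intro num _ _
  unfold Spec_palindrome_descendant palindrome_descendant palindrome_descendant_alt
  simp only [pdLoopA_eq_pdDescendB]
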